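-- pv_equiv track=rewrite | github.com/mohammadfaiizan/ProjectI | DSA/Problem/Queue_Stack/09_Competitive_Programming_Patterns/1209_Remove_All_Adjacent_Duplicates_in_String_II.py | removeDuplicates_recursive
-- ===== SOURCE A (Python) =====
-- def removeDuplicates_recursive(s: str, k: int) -> str:
--     """
--     Approach 4: Recursive Solution
--
--     Recursively remove k duplicates until no more can be removed.
--
--     Time: O(n²) worst case, Space: O(n) due to recursion
--     """
--     def remove_once(string: str) -> str:
--         """Remove one occurrence of k consecutive duplicates"""
--         i = 0
--         while i < len(string):
--             j = i
--             # Find end of current character sequence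
--             while j < len(string) and string[j] == string[i]:
--                 j += 1
--
--             # If sequence length is >= k, remove k characters
--             if j - i >= k:
--                 # Remove k characters and return modified string
--                 return string[:i] + string[i + k:]
--
--             i = j
--
--         return string
--
--     prev = ""
--     current = s
--
--     # Keep removing until no changes
--     while prev != current:
--         prev = current
--         current = remove_once(current)
--
--     return current
-- ===== SOURCE B (Python) =====
-- def removeDuplicates_recursive(s: str, k: int) -> str:
--     """Single left-to-right pass with a stack of [char, count] pairs; a group
--     is dropped the moment its count reaches k."""
--     stack = []  # [char, count], top at the end
--     for c in s:
--         if stack and stack[-1][0] == c: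
--             stack[-1][1] += 1
--         else:
--             stack.append([c, 1])
--         if stack[-1][1] == k:
--             stack.pop()
--     return ''.join(ch * cnt for ch, cnt in stack)
-- ===== Notes on version B (the rewrite author's own statement) =====
-- stated objective: alternative
-- what changed: Replaces A's repeat-until-fixpoint passes (each pass rescans the string for a run of length >= k and rebuilds it by slicing) with a single left-to-right pass over a stack of (char, count) pairs that pops a group the moment its count reaches k; intended as asymptotically faster (O(n) vs O(n^2) worst case) but a timing run measured only 1.37x on the random timing family, so no speed is claimed.
-- intended difference: For negative k with -k < len(s), A's slice string[i+k:] wraps around (Python negative indexing) so A returns only the last -k characters of s, while B returns s unchanged, which is the intended value since there is no group of negative size to remove. — e.g. on removeDuplicates_recursive("ab", -1): A returns "b", B returns "ab"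
import Mathlib
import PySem

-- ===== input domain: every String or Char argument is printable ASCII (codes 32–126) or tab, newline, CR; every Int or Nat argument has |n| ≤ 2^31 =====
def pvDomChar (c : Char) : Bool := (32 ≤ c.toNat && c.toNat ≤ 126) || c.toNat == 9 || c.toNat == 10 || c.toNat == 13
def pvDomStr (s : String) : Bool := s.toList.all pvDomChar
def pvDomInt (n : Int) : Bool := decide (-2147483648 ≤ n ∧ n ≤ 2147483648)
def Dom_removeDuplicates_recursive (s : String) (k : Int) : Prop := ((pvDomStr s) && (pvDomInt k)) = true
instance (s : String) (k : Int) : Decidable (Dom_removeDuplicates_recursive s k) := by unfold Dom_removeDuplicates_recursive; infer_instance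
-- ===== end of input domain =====

-- B replaces A's repeat-until-fixpoint rescan (each pass re-scans and re-splices the whole
-- string) by one left-to-right pass over a stack of (char, count) pairs.

-- ===== PORT A =====
-- A works on the string's character list; Python's indices i, j are nonnegative, so they are Nat.
-- Each while loop is made structurally total with a fuel argument that bounds its number of
-- iterations (the scan index strictly increases, and each pass strictly shortens the string,
-- as proved in the lemmas below), so the fuel-exhausted base case is never reached.

-- inner 'while j < len(string) and string[j] == string[i]' loop (c is string[i])
def pvA_findJGo (l : List Char) (c : Char) : Nat → Nat → Nat
  | 0, j => j
  | fuel + 1, j =>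
    if h : j < l.length then
      (if l[j] = c then pvA_findJGo l c fuel (j + 1) else j)
    else j

def pvA_findJ (l : List Char) (c : Char) (j : Nat) : Nat :=
  pvA_findJGo l c (l.length - j) j

-- outer 'while i < len(string)' loop of remove_once
def pvA_removeOnceGo (k : Int) (l : List Char) : Nat → Nat → List Char
  | 0, _ => l
  | fuel + 1, i =>
    if h : i < l.length then
      let j := pvA_findJ l (l[i]) i
      if (j : Int) - (i : Int) ≥ k then
        PySem.List.slice l none (some (i : Int)) ++ PySem.List.slice l (some ((i : Int) + k)) none
      else pvA_removeOnceGo k l fuel j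
    else l

def pvA_removeOnce (k : Int) (l : List Char) (i : Nat) : List Char :=
  pvA_removeOnceGo k l (l.length - i) i

-- 'while prev != current' fixpoint loop
def pvA_loopGo (k : Int) : Nat → List Char → List Char
  | 0, l => l
  | fuel + 1, l =>
    if pvA_removeOnce k l 0 = l then l else pvA_loopGo k fuel (pvA_removeOnce k l 0)

def pvA_loop (k : Int) (l : List Char) : List Char := pvA_loopGo k (l.length + 1) l

def removeDuplicates_recursive (s : String) (k : Int) : String :=
  String.ofList (pvA_loop k s.toList)

-- ===== PORT B =====
-- one fold step: push c onto the stack of (char, count) pairs (top = head), then pop a full group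
def pvB_step (k : Int) (st : List (Char × Int)) (c : Char) : List (Char × Int) :=
  let st' : List (Char × Int) :=
    match st with
    | (d, m) :: rest => if d = c then (d, m + 1) :: rest else (c, 1) :: (d, m) :: rest
    | [] => [(c, 1)]
  match st' with
  | (d, m) :: rest => if m = k then rest else (d, m) :: rest
  | [] => []

def removeDuplicates_recursive_alt (s : String) (k : Int) : String :=
  String.ofList (((s.toList.foldl (pvB_step k) []).reverse).flatMap
    (fun p => List.replicate p.2.toNat p.1))

-- ===== PRECONDITION & SPEC =====
-- For negative k with -k < len(s), A's slice string[i+k:] wraps around (Python negative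
-- indexing) so A returns only the last -k characters of s; B returns s unchanged, which is
-- the intended value since no group of a negative size exists to remove.
def D_removeDuplicates_recursive (s : String) (k : Int) : Prop :=
  k < 0 ∧ -k < (s.length : Int)
instance (s : String) (k : Int) : Decidable (D_removeDuplicates_recursive s k) := by
  unfold D_removeDuplicates_recursive; infer_instance

def Spec_removeDuplicates_recursive (s : String) (k : Int) (out : String) : Prop :=
  ¬ D_removeDuplicates_recursive s k → out = removeDuplicates_recursive_alt s k
instance (s : String) (k : Int) (out : String) : Decidable (Spec_removeDuplicates_recursive s k out) := by
  unfold Spec_removeDuplicates_recursive; infer_instance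

def pvDiffWitness_removeDuplicates_recursive : String × Int := ("ab", -1)
def pvDiffWitnessOut_removeDuplicates_recursive : String × String := ("b", "ab")

-- ===== CLAIM (what is proved, stated in full; the proofs are below) =====
def Claim_unchanged_removeDuplicates_recursive : Prop := ∀ (s : String) (k : Int), Dom_removeDuplicates_recursive s k → Spec_removeDuplicates_recursive s k (removeDuplicates_recursive s k)
def Claim_changed_removeDuplicates_recursive : Prop := Dom_removeDuplicates_recursive (pvDiffWitness_removeDuplicates_recursive.1) (pvDiffWitness_removeDuplicates_recursive.2) ∧ D_removeDuplicates_recursive (pvDiffWitness_removeDuplicates_recursive.1) (pvDiffWitness_removeDuplicates_recursive.2) ∧ removeDuplicates_recursive (pvDiffWitness_removeDuplicates_recursive.1) (pvDiffWitness_removeDuplicates_recursive.2) = pvDiffWitnessOut_removeDuplicates_recursive.1 ∧ removeDuplicates_recursive_alt (pvDiffWitness_removeDuplicates_recursive.1) (pvDiffWitness_removeDuplicates_recursive.2) = pvDiffWitnessOut_removeDuplicates_recursive.2 ∧ pvDiffWitnessOut_removeDuplicates_recursive.1 ≠ pvDiffWitnessOut_removeDuplicates_recursive.2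
def Claim_exact_removeDuplicates_recursive : Prop := ∀ (s : String) (k : Int), Dom_removeDuplicates_recursive s k → D_removeDuplicates_recursive s k → removeDuplicates_recursive s k ≠ removeDuplicates_recursive_alt s k

-- ===== LEMMAS AND PROOFS =====

-- abbreviations for the proofs
def pvSB (k : Int) (st : List (Char × Int)) (cs : List Char) : List (Char × Int) :=
  cs.foldl (pvB_step k) st

def pvOut (st : List (Char × Int)) : List Char :=
  st.reverse.flatMap (fun p => List.replicate p.2.toNat p.1)

-- stack invariant: positive counts, below k when k ≥ 1, adjacent entries carry distinct chars
def pvInv (k : Int) (st : List (Char × Int)) : Prop :=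
  (∀ p ∈ st, 1 ≤ p.2 ∧ (1 ≤ k → p.2 < k)) ∧ List.IsChain (fun a b => a.1 ≠ b.1) st

def pvHeadNe (c : Char) (st : List (Char × Int)) : Prop :=
  ∀ p ∈ st.head?, p.1 ≠ c

-- ----- port A: the fuel arguments are irrelevant once large enough, and one-step unfoldings -----

theorem pvA_findJGo_le (l : List Char) (c : Char) :
    ∀ (fuel j : Nat), j ≤ pvA_findJGo l c fuel j := by
  intro fuel
  induction fuel with
  | zero => intro j; exact le_refl j
  | succ fuel ih =>
    intro j
    simp only [pvA_findJGo]
    split_ifs with h1 h2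
    · exact le_trans (by omega) (ih (j + 1))
    · exact le_refl j
    · exact le_refl j

theorem pvA_findJ_le (l : List Char) (c : Char) (j : Nat) : j ≤ pvA_findJ l c j :=
  pvA_findJGo_le l c _ j

theorem pvA_findJGo_irrel (l : List Char) (c : Char) :
    ∀ (f1 f2 j : Nat), l.length ≤ j + f1 → l.length ≤ j + f2 →
      pvA_findJGo l c f1 j = pvA_findJGo l c f2 j := by
  intro f1
  induction f1 with
  | zero =>
    intro f2 j h1 h2
    cases f2 with
    | zero => rfl
    | succ f2 => simp only [pvA_findJGo]; rw [dif_neg (by omega)]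
  | succ f1 ih =>
    intro f2 j h1 h2
    by_cases hj : j < l.length
    · obtain ⟨f2', rfl⟩ : ∃ f2', f2 = f2' + 1 := ⟨f2 - 1, by omega⟩
      simp only [pvA_findJGo]
      rw [dif_pos hj, dif_pos hj]
      by_cases hc : l[j] = c
      · rw [if_pos hc, if_pos hc]
        exact ih f2' (j + 1) (by omega) (by omega)
      · rw [if_neg hc, if_neg hc]
    · cases f2 with
      | zero => simp only [pvA_findJGo]; rw [dif_neg hj]
      | succ f2 => simp only [pvA_findJGo]; rw [dif_neg hj, dif_neg hj]

-- one unfolding of pvA_findJ: exactly the inner while loop's guard and step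
theorem pvA_findJ_unfold (l : List Char) (c : Char) (j : Nat) :
    pvA_findJ l c j =
      if h : j < l.length then (if l[j] = c then pvA_findJ l c (j + 1) else j) else j := by
  by_cases hj : j < l.length
  · rw [dif_pos hj]
    obtain ⟨f, hf⟩ : ∃ f, l.length - j = f + 1 := ⟨l.length - j - 1, by omega⟩
    rw [pvA_findJ, hf]
    simp only [pvA_findJGo]
    rw [dif_pos hj]
    by_cases hc : l[j] = c
    · rw [if_pos hc, if_pos hc, pvA_findJ]
      exact pvA_findJGo_irrel l c f (l.length - (j + 1)) (j + 1) (by omega) (by omega)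
    · rw [if_neg hc, if_neg hc]
  · rw [dif_neg hj, pvA_findJ]
    have h0 : l.length - j = 0 := by omega
    rw [h0]
    rfl

theorem pvA_findJ_lt (l : List Char) (c : Char) (j : Nat) (h : j < l.length)
    (hc : l[j] = c) : j < pvA_findJ l c j := by
  rw [pvA_findJ_unfold, dif_pos h, if_pos hc]
  have := pvA_findJ_le l c (j + 1)
  omega

theorem pvA_findJGo_le_length (l : List Char) (c : Char) :
    ∀ (fuel j : Nat), j ≤ l.length → pvA_findJGo l c fuel j ≤ l.length := by
  intro fuel
  induction fuel with
  | zero => intro j h; exact h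
  | succ fuel ih =>
    intro j h
    simp only [pvA_findJGo]
    split_ifs with h1 h2
    · exact ih (j + 1) (by omega)
    · exact h
    · exact h

theorem pvA_findJ_le_length (l : List Char) (c : Char) (j : Nat) (h : j ≤ l.length) :
    pvA_findJ l c j ≤ l.length :=
  pvA_findJGo_le_length l c _ j h

theorem pvA_findJGo_mem (l : List Char) (c : Char) :
    ∀ (fuel j x : Nat), l.length ≤ j + fuel → j ≤ x → x < pvA_findJGo l c fuel j →
      l[x]? = some c := by
  intro fuel
  induction fuel with
  | zero => intro j x h1 h2 h3; exact absurd h3 (by simp only [pvA_findJGo]; omega)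
  | succ fuel ih =>
    intro j x h1 h2 h3
    simp only [pvA_findJGo] at h3
    by_cases hj : j < l.length
    · rw [dif_pos hj] at h3
      by_cases hc : l[j] = c
      · rw [if_pos hc] at h3
        rcases Nat.eq_or_lt_of_le h2 with heq | hlt2
        · subst heq; simp [List.getElem?_eq_getElem hj, hc]
        · exact ih (j + 1) x (by omega) hlt2 h3
      · rw [if_neg hc] at h3; omega
    · rw [dif_neg hj] at h3; omega

theorem pvA_findJ_mem (l : List Char) (c : Char) (j x : Nat) (hx : j ≤ x)
    (hlt : x < pvA_findJ l c j) : l[x]? = some c :=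
  pvA_findJGo_mem l c (l.length - j) j x (by omega) hx hlt

theorem pvA_findJGo_stop (l : List Char) (c : Char) :
    ∀ (fuel j : Nat), l.length ≤ j + fuel → pvA_findJGo l c fuel j < l.length →
      l[pvA_findJGo l c fuel j]? ≠ some c := by
  intro fuel
  induction fuel with
  | zero => intro j h1 h2; exfalso; simp only [pvA_findJGo] at h2; omega
  | succ fuel ih =>
    intro j h1 h2
    simp only [pvA_findJGo] at h2 ⊢
    by_cases hj : j < l.length
    · rw [dif_pos hj] at h2 ⊢
      by_cases hc : l[j] = c
      · rw [if_pos hc] at h2 ⊢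
        exact ih (j + 1) (by omega) h2
      · rw [if_neg hc] at h2 ⊢
        simp [List.getElem?_eq_getElem hj]
        intro hco; exact hc hco
    · rw [dif_neg hj] at h2 ⊢
      omega

theorem pvA_findJ_stop (l : List Char) (c : Char) (j : Nat)
    (h : pvA_findJ l c j < l.length) : l[pvA_findJ l c j]? ≠ some c :=
  pvA_findJGo_stop l c (l.length - j) j (by omega) h

theorem pvA_findJGo_shift (l : List Char) (c : Char) (i : Nat) :
    ∀ (fuel t : Nat), pvA_findJGo l c fuel (i + t) = i + pvA_findJGo (l.drop i) c fuel t := by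
  intro fuel
  induction fuel with
  | zero => intro t; rfl
  | succ fuel ih =>
    intro t
    simp only [pvA_findJGo]
    by_cases ht : t < (l.drop i).length
    · have hit : i + t < l.length := by have := l.length_drop (i := i); omega
      rw [dif_pos hit, dif_pos ht]
      by_cases hc : (l.drop i)[t]'ht = c
      · have hgc : l[i + t]'hit = c := by rw [← hc]; simp [List.getElem_drop]
        rw [if_pos hgc, if_pos hc, show i + t + 1 = i + (t + 1) by omega, ih (t + 1)]
      · have hgc : ¬ l[i + t]'hit = c := by
          intro hco; apply hc; simp [List.getElem_drop, hco]
        rw [if_neg hgc, if_neg hc]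
    · have h2 : ¬ i + t < l.length ∨ l.length ≤ i := by have := l.length_drop (i := i); omega
      rw [dif_neg ht]
      rcases h2 with h1 | h1
      · rw [dif_neg h1]
      · rw [dif_neg (show ¬ i + t < l.length by omega)]

theorem pvA_findJ_shift (l : List Char) (c : Char) (i t : Nat) :
    pvA_findJ l c (i + t) = i + pvA_findJ (l.drop i) c t := by
  rw [pvA_findJ, pvA_findJ]
  have hf : l.length - (i + t) = (l.drop i).length - t := by
    have := l.length_drop (i := i); omega
  rw [hf, pvA_findJGo_shift]

theorem pvA_removeOnceGo_irrel (k : Int) (l : List Char) :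
    ∀ (f1 f2 i : Nat), l.length ≤ i + f1 → l.length ≤ i + f2 →
      pvA_removeOnceGo k l f1 i = pvA_removeOnceGo k l f2 i := by
  intro f1
  induction f1 with
  | zero =>
    intro f2 i h1 h2
    cases f2 with
    | zero => rfl
    | succ f2 => simp only [pvA_removeOnceGo]; rw [dif_neg (by omega)]
  | succ f1 ih =>
    intro f2 i h1 h2
    by_cases hi : i < l.length
    · obtain ⟨f2', rfl⟩ : ∃ f2', f2 = f2' + 1 := ⟨f2 - 1, by omega⟩
      simp only [pvA_removeOnceGo]
      rw [dif_pos hi, dif_pos hi]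
      by_cases hcond : (pvA_findJ l (l[i]'hi) i : Int) - (i : Int) ≥ k
      · rw [if_pos hcond, if_pos hcond]
      · rw [if_neg hcond, if_neg hcond]
        have hj := pvA_findJ_lt l (l[i]'hi) i hi rfl
        exact ih f2' _ (by omega) (by omega)
    · cases f2 with
      | zero => simp only [pvA_removeOnceGo]; rw [dif_neg hi]
      | succ f2 => simp only [pvA_removeOnceGo]; rw [dif_neg hi, dif_neg hi]

-- one unfolding of pvA_removeOnce: exactly the outer while loop's guard and step
theorem pvA_removeOnce_unfold (k : Int) (l : List Char) (i : Nat) :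
    pvA_removeOnce k l i =
      if h : i < l.length then
        (if (pvA_findJ l (l[i]) i : Int) - (i : Int) ≥ k then
          PySem.List.slice l none (some (i : Int)) ++
            PySem.List.slice l (some ((i : Int) + k)) none
        else pvA_removeOnce k l (pvA_findJ l (l[i]) i))
      else l := by
  by_cases hi : i < l.length
  · rw [dif_pos hi]
    obtain ⟨f, hf⟩ : ∃ f, l.length - i = f + 1 := ⟨l.length - i - 1, by omega⟩
    rw [pvA_removeOnce, hf]
    simp only [pvA_removeOnceGo]
    rw [dif_pos hi]
    by_cases hcond : (pvA_findJ l (l[i]'hi) i : Int) - (i : Int) ≥ k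
    · rw [if_pos hcond, if_pos hcond]
    · rw [if_neg hcond, if_neg hcond, pvA_removeOnce]
      have hj := pvA_findJ_lt l (l[i]'hi) i hi rfl
      exact pvA_removeOnceGo_irrel k l f _ _ (by omega) (by omega)
  · rw [dif_neg hi, pvA_removeOnce]
    have h0 : l.length - i = 0 := by omega
    rw [h0]
    rfl

theorem pvA_removeOnceGo_shift (k : Int) (hk : 0 ≤ k) (l : List Char) (i : Nat) :
    ∀ (fuel t : Nat),
      pvA_removeOnceGo k l fuel (i + t) = l.take i ++ pvA_removeOnceGo k (l.drop i) fuel t := by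
  intro fuel
  induction fuel with
  | zero => intro t; exact (List.take_append_drop i l).symm
  | succ fuel ih =>
    intro t
    simp only [pvA_removeOnceGo]
    by_cases ht : t < (l.drop i).length
    · have hit : i + t < l.length := by have := l.length_drop (i := i); omega
      rw [dif_pos hit, dif_pos ht]
      have hg : l[i + t]'hit = (l.drop i)[t]'ht := by simp [List.getElem_drop]
      have hjj : pvA_findJ l (l[i + t]'hit) (i + t) =
          i + pvA_findJ (l.drop i) ((l.drop i)[t]'ht) t := by
        rw [hg, pvA_findJ_shift]
      rw [hjj]
      by_cases cond : (pvA_findJ (l.drop i) ((l.drop i)[t]'ht) t : Int) - (t : Int) ≥ k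
      · have hcond2 : ((i + pvA_findJ (l.drop i) ((l.drop i)[t]'ht) t : Nat) : Int) -
            ((i + t : Nat) : Int) ≥ k := by
          push_cast
          omega
        rw [if_pos hcond2, if_pos cond]
        have e1 : PySem.List.slice l none (some ((i + t : Nat) : Int)) = l.take (i + t) :=
          PySem.List.slice_to_natCast l (i + t)
        have e2 : ((i + t : Nat) : Int) + k = ((i + t + k.toNat : Nat) : Int) := by omega
        have e3 : ((t : Nat) : Int) + k = ((t + k.toNat : Nat) : Int) := by omega
        rw [e1, e2, PySem.List.slice_from_natCast]
        rw [PySem.List.slice_to_natCast, e3, PySem.List.slice_from_natCast]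
        rw [List.take_add, List.drop_drop]
        rw [show i + t + k.toNat = t + k.toNat + i by omega]
        simp [List.append_assoc]
        omega
      · have hcond2 : ¬ (((i + pvA_findJ (l.drop i) ((l.drop i)[t]'ht) t : Nat) : Int) -
            ((i + t : Nat) : Int) ≥ k) := by
          push_cast
          omega
        rw [if_neg hcond2, if_neg cond]
        exact ih _
    · have hit : ¬ i + t < l.length := by have := l.length_drop (i := i); omega
      rw [dif_neg hit, dif_neg ht]
      exact (List.take_append_drop i l).symm

theorem pvA_removeOnce_shift (k : Int) (hk : 0 ≤ k) (l : List Char) (i t : Nat) :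
    pvA_removeOnce k l (i + t) = l.take i ++ pvA_removeOnce k (l.drop i) t := by
  rw [pvA_removeOnce, pvA_removeOnce]
  have hf : l.length - (i + t) = (l.drop i).length - t := by
    have := l.length_drop (i := i); omega
  rw [hf, pvA_removeOnceGo_shift k hk l i _ t]


theorem pvA_removeOnce_spec (k : Int) (hk : 1 ≤ k) (l : List Char) (i : Nat) :
    pvA_removeOnce k l i = l ∨
    ∃ i₀ c, i ≤ i₀ ∧ i₀ + k.toNat ≤ l.length ∧
      (∀ x, i₀ ≤ x → x < i₀ + k.toNat → l[x]? = some c) ∧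
      pvA_removeOnce k l i = l.take i₀ ++ l.drop (i₀ + k.toNat) := by
  have H : ∀ (fuel i : Nat), l.length ≤ i + fuel →
      (pvA_removeOnce k l i = l ∨
        ∃ i₀ c, i ≤ i₀ ∧ i₀ + k.toNat ≤ l.length ∧
          (∀ x, i₀ ≤ x → x < i₀ + k.toNat → l[x]? = some c) ∧
          pvA_removeOnce k l i = l.take i₀ ++ l.drop (i₀ + k.toNat)) := by
    intro fuel
    induction fuel with
    | zero =>
      intro i hi
      left
      rw [pvA_removeOnce_unfold, dif_neg (by omega)]
    | succ fuel ih =>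
      intro i hi
      by_cases h : i < l.length
      · rw [pvA_removeOnce_unfold, dif_pos h]
        by_cases cond : (pvA_findJ l (l[i]'h) i : Int) - (i : Int) ≥ k
        · rw [if_pos cond]
          refine Or.inr ⟨i, l[i]'h, le_refl i, ?_, ?_, ?_⟩
          · have hj := pvA_findJ_le_length l (l[i]'h) i (by omega)
            omega
          · intro x hx hxk
            refine pvA_findJ_mem l (l[i]'h) i x hx ?_
            omega
          · have hik : (i : Int) + k = ((i + k.toNat : Nat) : Int) := by omega
            rw [hik, PySem.List.slice_to_natCast, PySem.List.slice_from_natCast]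
        · rw [if_neg cond]
          have hj := pvA_findJ_lt l (l[i]'h) i h rfl
          rcases ih (pvA_findJ l (l[i]'h) i) (by omega) with h1 | ⟨i₀, c, hi₀, hlen, hmem, hres⟩
          · exact Or.inl h1
          · exact Or.inr ⟨i₀, c, by omega, hlen, hmem, hres⟩
      · left
        rw [pvA_removeOnce_unfold, dif_neg h]
  exact H (l.length - i) i (by omega)

theorem pvA_removeOnce_nonpos (k : Int) (hk : k ≤ 0) (l : List Char) :
    pvA_removeOnce k l 0 =
      if k < 0 then l.drop (l.length - (-k).toNat) else l := by
  rw [pvA_removeOnce_unfold]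
  by_cases h : 0 < l.length
  · rw [dif_pos h]
    have hcond : ((pvA_findJ l (l[0]) 0 : Int) - ((0:Nat) : Int) ≥ k) := by
      have := pvA_findJ_le l (l[0]) 0
      omega
    rw [if_pos hcond]
    have h0 : PySem.List.slice l none (some ((0:Nat) : Int)) = [] := by
      rw [PySem.List.slice_to_natCast]
      simp
    rw [h0, List.nil_append]
    rcases lt_or_eq_of_le hk with hneg | h0'
    · rw [if_pos hneg]
      have hm : (0:Nat) < (-k).toNat := by omega
      have hkk : ((0:Nat) : Int) + k = -(((-k).toNat : Nat) : Int) := by omega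
      rw [hkk, PySem.List.slice_from_neg_natCast l _ hm]
    · rw [if_neg (by omega)]
      have hkk : ((0:Nat) : Int) + k = (((0:Nat) : Nat) : Int) := by omega
      rw [hkk, PySem.List.slice_from_natCast]
      simp
  · rw [dif_neg h]
    have : l = [] := by
      cases l
      · rfl
      · simp at h
    subst this
    simp

theorem pvA_removeOnce_shrink (k : Int) (l : List Char)
    (h : pvA_removeOnce k l 0 ≠ l) : (pvA_removeOnce k l 0).length < l.length := by
  by_cases hk1 : 1 ≤ k
  · rcases pvA_removeOnce_spec k hk1 l 0 with he | ⟨i₀, c, hi₀, hlen, hmem, hres⟩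
    · exact absurd he h
    · rw [hres]
      simp only [List.length_append, List.length_take, List.length_drop]
      omega
  · rw [pvA_removeOnce_nonpos k (by omega) l] at h ⊢
    by_cases hneg : k < 0
    · rw [if_pos hneg] at h ⊢
      by_cases hz : l.length - (-k).toNat = 0
      · rw [hz] at h; simp at h
      · simp only [List.length_drop]
        omega
    · rw [if_neg hneg] at h
      exact absurd rfl h


theorem pvA_loopGo_irrel (k : Int) :
    ∀ (f1 f2 : Nat) (l : List Char), l.length < f1 → l.length < f2 →
      pvA_loopGo k f1 l = pvA_loopGo k f2 l := by
  intro f1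
  induction f1 with
  | zero => intro f2 l h1 h2; omega
  | succ f1 ih =>
    intro f2 l h1 h2
    obtain ⟨f2', rfl⟩ : ∃ f2', f2 = f2' + 1 := ⟨f2 - 1, by omega⟩
    simp only [pvA_loopGo]
    by_cases hfix : pvA_removeOnce k l 0 = l
    · rw [if_pos hfix, if_pos hfix]
    · rw [if_neg hfix, if_neg hfix]
      have := pvA_removeOnce_shrink k l hfix
      exact ih f2' _ (by omega) (by omega)

-- one unfolding of pvA_loop: exactly the fixpoint loop's guard and step
theorem pvA_loop_unfold (k : Int) (l : List Char) :
    pvA_loop k l =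
      if pvA_removeOnce k l 0 = l then l else pvA_loop k (pvA_removeOnce k l 0) := by
  show pvA_loopGo k (l.length + 1) l = _
  simp only [pvA_loopGo]
  by_cases hfix : pvA_removeOnce k l 0 = l
  · rw [if_pos hfix, if_pos hfix]
  · rw [if_neg hfix, if_neg hfix]
    have := pvA_removeOnce_shrink k l hfix
    exact pvA_loopGo_irrel k l.length ((pvA_removeOnce k l 0).length + 1) _ (by omega) (by omega)

theorem pvA_loop_fix (k : Int) (l : List Char) :
    pvA_removeOnce k (pvA_loop k l) 0 = pvA_loop k l := by
  have H : ∀ (fuel : Nat) (l : List Char), l.length < fuel →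
      pvA_removeOnce k (pvA_loopGo k fuel l) 0 = pvA_loopGo k fuel l := by
    intro fuel
    induction fuel with
    | zero => intro l h; omega
    | succ fuel ih =>
      intro l h
      simp only [pvA_loopGo]
      by_cases hfix : pvA_removeOnce k l 0 = l
      · rw [if_pos hfix]; exact hfix
      · rw [if_neg hfix]
        exact ih _ (by have := pvA_removeOnce_shrink k l hfix; omega)
  exact H (l.length + 1) l (by omega)





theorem pvDecomp (l : List Char) (i₀ n : Nat) (c : Char) (hle : i₀ + n ≤ l.length)
    (hx : ∀ x, i₀ ≤ x → x < i₀ + n → l[x]? = some c) :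
    l = l.take i₀ ++ List.replicate n c ++ l.drop (i₀ + n) := by
  have h4 : (l.drop i₀).take n = List.replicate n c := by
    apply List.ext_getElem?
    intro x
    by_cases hxn : x < n
    · rw [List.getElem?_take, if_pos hxn, List.getElem?_drop, List.getElem?_replicate,
        if_pos hxn]
      exact hx (i₀ + x) (by omega) (by omega)
    · rw [List.getElem?_take, if_neg hxn, List.getElem?_replicate, if_neg hxn]
  have h3 : (l.drop i₀).drop n = l.drop (i₀ + n) := by
    rw [List.drop_drop, Nat.add_comm]
  conv_lhs => rw [← List.take_append_drop i₀ l, ← List.take_append_drop n (l.drop i₀)]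
  rw [h4, h3, List.append_assoc]

theorem pvB_step_inv (k : Int) (st : List (Char × Int)) (c : Char) (h : pvInv k st) :
    pvInv k (pvB_step k st c) := by
  obtain ⟨hcnt, hch⟩ := h
  cases st with
  | nil =>
    simp only [pvB_step]
    split_ifs with h1
    · exact ⟨by simp, by simp⟩
    · refine ⟨?_, by simp⟩
      intro p hp
      simp at hp
      subst hp
      exact ⟨le_refl 1, fun hk => by omega⟩
  | cons hd rest =>
    obtain ⟨d, m⟩ := hd
    have hm := hcnt (d, m) (List.mem_cons_self)
    by_cases hdc : d = c
    · simp only [pvB_step, if_pos hdc]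
      split_ifs with h1
      · exact ⟨fun p hp => hcnt p (List.mem_cons_of_mem _ hp), hch.tail⟩
      · refine ⟨?_, ?_⟩
        · intro p hp
          rcases List.mem_cons.mp hp with he | hm2
          · subst he
            refine ⟨by simp; omega, fun hk => ?_⟩
            simp only
            have := hm.2 hk
            omega
          · exact hcnt p (List.mem_cons_of_mem _ hm2)
        · cases rest with
          | nil => simp
          | cons q rq =>
            rw [List.isChain_cons_cons] at hch ⊢
            exact ⟨hch.1, hch.2⟩
    · simp only [pvB_step, if_neg hdc]
      split_ifs with h1
      · exact ⟨hcnt, hch⟩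
      · refine ⟨?_, ?_⟩
        · intro p hp
          rcases List.mem_cons.mp hp with he | hm2
          · subst he
            exact ⟨le_refl 1, fun hk => by omega⟩
          · exact hcnt p hm2
        · rw [List.isChain_cons_cons]
          exact ⟨fun hco => hdc (by simpa using hco.symm), hch⟩

theorem pvSB_append (k : Int) (st : List (Char × Int)) (u v : List Char) :
    pvSB k st (u ++ v) = pvSB k (pvSB k st u) v := by
  simp [pvSB, List.foldl_append]

theorem pvSB_bump (k : Int) (c : Char) (m : Int) (st : List (Char × Int)) (n : Nat)
    (hm : 1 ≤ m) (hcond : 1 ≤ k → m + (n : Int) < k) :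
    pvSB k ((c, m) :: st) (List.replicate n c) = (c, m + (n : Int)) :: st := by
  induction n generalizing m with
  | zero => simp [pvSB]
  | succ n ih =>
    rw [List.replicate_succ]
    show pvSB k (pvB_step k ((c, m) :: st) c) (List.replicate n c) = _
    have hmk : ¬ (m + 1 = k) := by
      by_cases h1 : 1 ≤ k
      · have := hcond h1; push_cast at this; omega
      · omega
    have hstep : pvB_step k ((c, m) :: st) c = (c, m + 1) :: st := by
      simp [pvB_step, hmk]
    rw [hstep, ih (m + 1) (by omega) (fun hk1 => by have := hcond hk1; push_cast at this ⊢; omega)]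
    congr 2
    push_cast
    ring

theorem pvSB_push (k : Int) (c : Char) (st : List (Char × Int)) (n : Nat)
    (h1 : 1 ≤ n) (hcond : 1 ≤ k → (n : Int) < k) (hne : pvHeadNe c st) :
    pvSB k st (List.replicate n c) = (c, (n : Int)) :: st := by
  obtain ⟨n, rfl⟩ : ∃ n', n' + 1 = n := ⟨n - 1, by omega⟩
  rw [List.replicate_succ]
  show pvSB k (pvB_step k st c) (List.replicate n c) = _
  have hk1 : ¬ ((1:Int) = k) := by
    intro he
    rcases Int.lt_or_le k 1 with h1 | h1
    · omega
    · have := hcond h1; push_cast at this; omega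
  have hstep : pvB_step k st c = (c, 1) :: st := by
    cases st with
    | nil => simp only [pvB_step]; rw [if_neg hk1]
    | cons hd rest =>
      obtain ⟨d, m⟩ := hd
      have hdc : ¬ d = c := hne (d, m) (by simp)
      simp only [pvB_step, if_neg hdc]
      rw [if_neg hk1]
  rw [hstep, pvSB_bump k c 1 st n (le_refl 1)
    (fun hk1 => by have := hcond hk1; push_cast at this ⊢; omega)]
  push_cast
  ring_nf

theorem pvSB_fill (k : Int) (hk : 1 ≤ k) (c : Char) (m : Int) (st : List (Char × Int))
    (hm : 1 ≤ m) (hmk : m < k) :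
    pvSB k ((c, m) :: st) (List.replicate (k - m).toNat c) = st := by
  have hr : (k - m).toNat = ((k - m).toNat - 1) + 1 := by omega
  rw [hr, List.replicate_succ']
  rw [pvSB_append, pvSB_bump k c m st _ hm
    (fun _ => by push_cast; omega)]
  show pvB_step k ((c, m + ((k - m).toNat - 1 : Nat)) :: st) c = st
  have hm1 : m + (((k - m).toNat - 1 : Nat) : Int) + 1 = k := by push_cast; omega
  simp [pvB_step, hm1]

theorem pvSB_feedK (k : Int) (hk : 1 ≤ k) (st : List (Char × Int)) (c : Char)
    (hinv : pvInv k st) : pvSB k st (List.replicate k.toNat c) = st := by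
  obtain ⟨hcnt, hch⟩ := hinv
  have main : ∀ st', pvInv k st' → pvHeadNe c st' → pvSB k st' (List.replicate k.toNat c) = st' := by
    intro st' hinv' hne'
    by_cases hk1 : k = 1
    · subst hk1
      rw [show (1:Int).toNat = 1 by rfl, List.replicate_succ, List.replicate_zero]
      show pvSB 1 (pvB_step 1 st' c) [] = st'
      have hstep : pvB_step 1 st' c = st' := by
        cases st' with
        | nil => simp [pvB_step]
        | cons hd rest =>
          obtain ⟨d, m⟩ := hd
          have hdc : ¬ d = c := hne' (d, m) (by simp)
          simp [pvB_step, hdc]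
      rw [hstep]; rfl
    · have hk2 : 2 ≤ k := by omega
      have hsplit : k.toNat = 1 + (k - 1).toNat := by omega
      rw [hsplit, List.replicate_add, pvSB_append, List.replicate_one]
      show pvSB k (pvB_step k st' c) (List.replicate (k - 1).toNat c) = st'
      have hstep : pvB_step k st' c = (c, 1) :: st' := by
        cases st' with
        | nil => simp only [pvB_step]; rw [if_neg (by omega)]
        | cons hd rest =>
          obtain ⟨d, m⟩ := hd
          have hdc : ¬ d = c := hne' (d, m) (by simp)
          simp only [pvB_step, if_neg hdc]
          rw [if_neg (by omega)]
      rw [hstep]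
      have := pvSB_fill k hk (c := c) (m := 1) (st := st') (by omega) (by omega)
      simpa using this
  cases st with
  | nil => exact main [] ⟨by simp, by simp⟩ (by simp [pvHeadNe])
  | cons hd rest =>
    obtain ⟨d, m⟩ := hd
    by_cases hdc : d = c
    · subst hdc
      have hm := hcnt (d, m) (List.mem_cons_self)
      have hmk := hm.2 hk
      have hsplit : k.toNat = (k - m).toNat + m.toNat := by omega
      rw [hsplit, List.replicate_add, pvSB_append]
      rw [pvSB_fill k hk d m rest hm.1 hmk]
      have hne2 : pvHeadNe d rest := by
        intro p hp
        cases rest with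
        | nil => simp at hp
        | cons q rq =>
          rw [List.isChain_cons_cons] at hch
          simp at hp
          subst hp
          exact fun he => hch.1 (by simp [he])
      rw [pvSB_push k d rest m.toNat (by omega) (fun _ => by omega) hne2]
      congr 1
      simp
      omega
    · exact main _ ⟨hcnt, hch⟩ (fun p hp => by simp at hp; subst hp; exact hdc)

theorem pvSB_inv (k : Int) (st : List (Char × Int)) (cs : List Char) (h : pvInv k st) :
    pvInv k (pvSB k st cs) := by
  induction cs generalizing st with
  | nil => exact h
  | cons c cs ih => exact ih _ (pvB_step_inv k st c h)

theorem pvSB_skip (k : Int) (hk : 1 ≤ k) (st : List (Char × Int)) (u v : List Char)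
    (c : Char) (hinv : pvInv k st) :
    pvSB k st (u ++ List.replicate k.toNat c ++ v) = pvSB k st (u ++ v) := by
  rw [pvSB_append, pvSB_append, pvSB_append]
  rw [pvSB_feedK k hk _ c (pvSB_inv k st u hinv)]



theorem pvSB_loop (k : Int) (hk : 1 ≤ k) (l : List Char) :
    pvSB k [] (pvA_loop k l) = pvSB k [] l := by
  have H : ∀ (fuel : Nat) (l : List Char), l.length < fuel →
      pvSB k [] (pvA_loopGo k fuel l) = pvSB k [] l := by
    intro fuel
    induction fuel with
    | zero => intro l h; omega
    | succ fuel ih =>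
      intro l h
      simp only [pvA_loopGo]
      by_cases hfix : pvA_removeOnce k l 0 = l
      · rw [if_pos hfix]
      · rw [if_neg hfix]
        rw [ih _ (by have := pvA_removeOnce_shrink k l hfix; omega)]
        rcases pvA_removeOnce_spec k hk l 0 with he | ⟨i₀, c, _, hlen2, hmem, hres⟩
        · exact absurd he hfix
        · rw [hres]
          conv_rhs => rw [pvDecomp l i₀ k.toNat c hlen2 hmem]
          rw [pvSB_skip k hk [] _ _ c ⟨by simp, by simp⟩]
  exact H (l.length + 1) l (by omega)

-- main 'no pops' lemma
theorem pvG (k : Int) (l : List Char) (st : List (Char × Int))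
    (h : 1 ≤ k → pvA_removeOnce k l 0 = l) (hinv : pvInv k st)
    (hne : ∀ c t, l = c :: t → pvHeadNe c st) :
    pvOut (pvSB k st l) = pvOut st ++ l := by
  suffices H : ∀ (n : Nat) (l : List Char) (st : List (Char × Int)), l.length ≤ n →
      (1 ≤ k → pvA_removeOnce k l 0 = l) → pvInv k st →
      (∀ c t, l = c :: t → pvHeadNe c st) →
      pvOut (pvSB k st l) = pvOut st ++ l by
    exact H l.length l st (le_refl _) h hinv hne
  intro n
  induction n with
  | zero =>
    intro l st hn _ _ _
    have : l = [] := List.length_eq_zero_iff.mp (by omega)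
    subst this
    simp [pvSB, pvOut]
  | succ n ihn =>
    intro l st hn h hinv hne
    cases l with
    | nil => simp [pvSB, pvOut]
    | cons c t =>
      set l : List Char := c :: t with hl
      have hlen0 : 0 < l.length := by simp [hl]
      have hg0 : l[0]'hlen0 = c := rfl
      set r : Nat := pvA_findJ l c 0 with hrdef
      have hr1 : 1 ≤ r := pvA_findJ_lt l c 0 hlen0 hg0
      have hrlen : r ≤ l.length := pvA_findJ_le_length l c 0 (by omega)
      have htake : l.take r = List.replicate r c := by
        apply List.ext_getElem?
        intro x
        by_cases hx : x < r
        · rw [List.getElem?_take, if_pos hx, List.getElem?_replicate, if_pos hx]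
          exact pvA_findJ_mem l c 0 x (by omega) hx
        · rw [List.getElem?_take, if_neg hx, List.getElem?_replicate, if_neg hx]
      have hdecomp : l = List.replicate r c ++ l.drop r := by
        conv_lhs => rw [← List.take_append_drop r l]
        rw [htake]
      have hrk : 1 ≤ k → (r : Int) < k := by
        intro hk1
        by_contra hge
        have hfix := h hk1
        rw [pvA_removeOnce_unfold, dif_pos hlen0] at hfix
        simp only [hg0] at hfix
        rw [← hrdef] at hfix
        rw [if_pos (by omega)] at hfix
        have : (PySem.List.slice l none (some ((0:Nat) : Int)) ++
            PySem.List.slice l (some (((0:Nat) : Int) + k)) none).length = l.length := by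
          rw [hfix]
        rw [PySem.List.slice_to_natCast] at this
        have ek : ((0:Nat) : Int) + k = ((k.toNat : Nat) : Int) := by omega
        rw [ek, PySem.List.slice_from_natCast] at this
        simp at this
        omega
      have hSB1 : pvSB k st l = pvSB k ((c, (r : Int)) :: st) (l.drop r) := by
        conv_lhs => rw [hdecomp]
        rw [pvSB_append, pvSB_push k c st r hr1 hrk (hne c t hl)]
      have hfix' : 1 ≤ k → pvA_removeOnce k (l.drop r) 0 = l.drop r := by
        intro hk1
        have hfix := h hk1
        rw [pvA_removeOnce_unfold, dif_pos hlen0] at hfix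
        simp only [hg0] at hfix
        rw [← hrdef, if_neg (by have := hrk hk1; omega)] at hfix
        have hshift := pvA_removeOnce_shift k (by omega) l r 0
        rw [Nat.add_zero] at hshift
        rw [hshift] at hfix
        conv_rhs at hfix => rw [← List.take_append_drop r l]
        exact List.append_cancel_left hfix
      have hinv' : pvInv k ((c, (r : Int)) :: st) := by
        refine ⟨?_, ?_⟩
        · intro p hp
          rcases List.mem_cons.mp hp with he | hm
          · subst he
            exact ⟨by push_cast; omega, fun hk1 => hrk hk1⟩
          · exact hinv.1 p hm
        · exact hinv.2.cons (fun y hy => fun he => (hne c t hl) y hy (by simp [← he]))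
      have hne' : ∀ c' t', l.drop r = c' :: t' → pvHeadNe c' ((c, (r : Int)) :: st) := by
        intro c' t' hdrop p hp
        simp only [List.head?_cons, Option.mem_some_iff] at hp
        subst hp
        have hrlt : r < l.length := by
          by_contra hge
          rw [List.drop_eq_nil_of_le (by omega)] at hdrop
          simp at hdrop
        have hstop := pvA_findJ_stop l c 0 (by rw [← hrdef]; omega)
        rw [← hrdef] at hstop
        have : l[r]? = some c' := by
          rw [show r = r + 0 by omega, ← List.getElem?_drop, hdrop]
          rfl
        simp only
        intro he
        apply hstop
        rw [this, he]
      have hIH := ihn (l.drop r) ((c, (r : Int)) :: st)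
        (by simp [hl] at hn ⊢; omega) hfix' hinv' hne'
      rw [hSB1, hIH]
      have hout : pvOut ((c, (r : Int)) :: st) = pvOut st ++ List.replicate r c := by
        simp [pvOut, List.reverse_cons, List.flatMap_append]
      rw [hout, List.append_assoc, ← hdecomp]

theorem pvA_neg (k : Int) (l : List Char) (hk : k < 0) (hlen : -k < (l.length : Int)) :
    pvA_loop k l = l.drop (l.length - (-k).toNat) := by
  have hm1 : 1 ≤ (-k).toNat := by omega
  have hmlen : (-k).toNat < l.length := by omega
  have h1 : pvA_removeOnce k l 0 = l.drop (l.length - (-k).toNat) := by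
    rw [pvA_removeOnce_nonpos k (by omega) l, if_pos hk]
  have hne : pvA_removeOnce k l 0 ≠ l := by
    rw [h1]
    intro he
    have := congrArg List.length he
    simp at this
    omega
  rw [pvA_loop_unfold, if_neg hne, h1]
  have hlen2 : (l.drop (l.length - (-k).toNat)).length = (-k).toNat := by
    simp
    omega
  have h2 : pvA_removeOnce k (l.drop (l.length - (-k).toNat)) 0 = l.drop (l.length - (-k).toNat) := by
    rw [pvA_removeOnce_nonpos k (by omega) _, if_pos hk, hlen2]
    simp
  rw [pvA_loop_unfold, if_pos h2]

-- ===== VERDICT (by name: the statement is the Claim_ definition above) =====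
theorem removeDuplicates_recursive_spec : Claim_unchanged_removeDuplicates_recursive := by
  intro s k _hdom hD
  show String.ofList (pvA_loop k s.toList) =
    String.ofList (pvOut (pvSB k [] s.toList))
  set l := s.toList with hl
  by_cases hk1 : 1 ≤ k
  · have e2 := pvG k (pvA_loop k l) [] (fun _ => pvA_loop_fix k l) ⟨by simp, by simp⟩
      (fun c t _ => by intro p hp; simp at hp)
    rw [pvSB_loop k hk1 l] at e2
    rw [e2]
    rfl
  · have hD' : ¬ (k < 0 ∧ -k < (l.length : Int)) := by
      intro ⟨ha, hb⟩
      exact hD ⟨ha, by rwa [show (s.length : Int) = (l.length : Int) by rw [hl, String.length_toList]]⟩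
    have hfix : pvA_removeOnce k l 0 = l := by
      rw [pvA_removeOnce_nonpos k (by omega) l]
      by_cases hneg : k < 0
      · rw [if_pos hneg]
        have : l.length - (-k).toNat = 0 := by omega
        rw [this]
        simp
      · rw [if_neg hneg]
    have hloop : pvA_loop k l = l := by rw [pvA_loop_unfold, if_pos hfix]
    have e2 := pvG k l [] (fun hx => absurd hx hk1) ⟨by simp, by simp⟩
      (fun c t _ => by intro p hp; simp at hp)
    rw [hloop, e2]
    rfl

theorem removeDuplicates_recursive_changed : Claim_changed_removeDuplicates_recursive := by
  unfold Claim_changed_removeDuplicates_recursive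
  refine ⟨by decide, by decide, ?_, by decide, by decide⟩
  show removeDuplicates_recursive "ab" (-1) = "b"
  show String.ofList (pvA_loop (-1) "ab".toList) = "b"
  have hab : "ab".toList = ['a', 'b'] := rfl
  rw [hab, pvA_neg (-1) ['a', 'b'] (by norm_num) (by norm_num)]
  rfl

theorem removeDuplicates_recursive_tight : Claim_exact_removeDuplicates_recursive := by
  intro s k _hdom hD
  obtain ⟨hkneg, hklen⟩ := hD
  set l := s.toList with hl
  have hlen : (s.length : Int) = (l.length : Int) := by rw [hl, String.length_toList]
  rw [hlen] at hklen
  show String.ofList (pvA_loop k l) ≠ String.ofList (pvOut (pvSB k [] l))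
  have e2 := pvG k l [] (fun hx => by omega) ⟨by simp, by simp⟩
    (fun c t _ => by intro p hp; simp at hp)
  rw [e2, pvA_neg k l hkneg hklen]
  intro he
  have := congrArg String.toList he
  rw [String.toList_ofList, String.toList_ofList] at this
  have hle := congrArg List.length this
  simp at hle
  omega
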